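-- pv_equiv track=rewrite | github.com/th-nuernberg/llars | app/db/models/llm_model.py | _pick_neutral_hue
-- ===== SOURCE A (Python) =====
-- NEUTRAL_HUE_RANGES = [
--     (25, 80),   # warm amber/orange
--     (160, 240), # teal/blue
--     (260, 320), # purple/magenta
-- ]
--
-- def _pick_neutral_hue(seed: int) -> float:
--     total_range = sum(end - start for start, end in NEUTRAL_HUE_RANGES)
--     offset = seed % total_range
--     for start, end in NEUTRAL_HUE_RANGES:
--         span = end - start
--         if offset < span:
--             return start + offset
--         offset -= span
--     return NEUTRAL_HUE_RANGES[0][0]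
-- ===== SOURCE B (Python) =====
-- NEUTRAL_HUE_RANGES = [
--     (25, 80),   # warm amber/orange
--     (160, 240), # teal/blue
--     (260, 320), # purple/magenta
-- ]
--
-- # prefix table of cumulative span widths, built once at import time
-- _CUM = []
-- _acc = 0
-- for _s, _e in NEUTRAL_HUE_RANGES:
--     _acc += _e - _s
--     _CUM.append(_acc)
--
-- def _bisect_right(table, x):
--     lo, hi = 0, len(table)
--     while lo < hi:
--         mid = (lo + hi) // 2
--         if x < table[mid]:
--             hi = mid
--         else:
--             lo = mid + 1
--     return lo
--
-- def _pick_neutral_hue(seed: int) -> float: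
--     offset = seed % _CUM[-1]
--     i = _bisect_right(_CUM, offset)
--     prev = _CUM[i - 1] if i > 0 else 0
--     return NEUTRAL_HUE_RANGES[i][0] + (offset - prev)
-- ===== Notes on version B (the rewrite author's own statement) =====
-- stated objective: alternative
-- what changed: Replaces the linear decrement scan over the ranges with a precomputed prefix-sum table of span widths plus a binary search (bisect_right) that locates the containing range directly.
import Mathlib
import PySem

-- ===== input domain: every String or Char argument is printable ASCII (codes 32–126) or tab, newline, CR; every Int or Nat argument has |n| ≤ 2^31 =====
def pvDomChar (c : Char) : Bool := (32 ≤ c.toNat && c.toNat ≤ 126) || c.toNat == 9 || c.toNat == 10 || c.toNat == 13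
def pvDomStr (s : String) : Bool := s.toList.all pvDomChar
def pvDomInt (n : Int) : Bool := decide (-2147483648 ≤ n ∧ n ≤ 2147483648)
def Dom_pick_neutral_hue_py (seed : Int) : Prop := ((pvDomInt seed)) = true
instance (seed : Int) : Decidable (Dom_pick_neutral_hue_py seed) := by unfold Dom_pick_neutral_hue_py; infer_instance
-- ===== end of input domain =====

-- B replaces A's linear decrement scan with a prefix-sum table of the span widths
-- plus a hand-written bisect_right binary search; return values are identical (alternative, not faster).

-- ===== PORT A =====
def NEUTRAL_HUE_RANGES : List (Int × Int) := [(25, 80), (160, 240), (260, 320)]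

-- the for-loop of A: scan the ranges, decrementing offset by each span
def pickScan (ranges : List (Int × Int)) (offset : Int) : Option Int :=
  match ranges with
  | [] => none
  | (s, e) :: rest =>
      let span := e - s
      if offset < span then some (s + offset) else pickScan rest (offset - span)

def pick_neutral_hue_py (seed : Int) : Int :=
  let total_range := (NEUTRAL_HUE_RANGES.map (fun p => p.2 - p.1)).foldl (· + ·) 0
  let offset := PySem.Int.mod seed total_range
  match pickScan NEUTRAL_HUE_RANGES offset with
  | some v => v
  | none => ((PySem.List.pyGet? NEUTRAL_HUE_RANGES 0).map Prod.fst).getD 0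

-- ===== PORT B =====
-- prefix table of cumulative span widths, built once (Source B's import-time loop)
def CUM : List Int :=
  (NEUTRAL_HUE_RANGES.foldl
    (fun (st : List Int × Int) p =>
      let acc := st.2 + (p.2 - p.1)
      (st.1 ++ [acc], acc)) ([], 0)).1

-- hand-written bisect_right of Source B (while lo < hi)
def bisectRight (table : List Int) (x : Int) (lo hi : Nat) : Nat :=
  if _h : lo < hi then
    let mid := (lo + hi) / 2
    if x < (PySem.List.pyGet? table (mid : Int)).getD 0 then
      bisectRight table x lo mid
    else
      bisectRight table x (mid + 1) hi
  else lo
termination_by hi - lo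

def pick_neutral_hue_py_alt (seed : Int) : Int :=
  let offset := PySem.Int.mod seed ((PySem.List.pyGet? CUM (-1)).getD 0)
  let i := bisectRight CUM offset 0 CUM.length
  let prev := if i > 0 then (PySem.List.pyGet? CUM ((i : Int) - 1)).getD 0 else 0
  ((PySem.List.pyGet? NEUTRAL_HUE_RANGES (i : Int)).map Prod.fst).getD 0 + (offset - prev)

-- ===== PRECONDITION & SPEC =====
def Spec_pick_neutral_hue_py (seed : Int) (out : Int) : Prop := out = pick_neutral_hue_py_alt seed
instance (seed : Int) (out : Int) : Decidable (Spec_pick_neutral_hue_py seed out) := by unfold Spec_pick_neutral_hue_py; infer_instance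

-- ===== CLAIM (what is proved, stated in full; the proofs are below) =====
def Claim_equal_pick_neutral_hue_py : Prop := ∀ (seed : Int), Dom_pick_neutral_hue_py seed → Spec_pick_neutral_hue_py seed (pick_neutral_hue_py seed)

-- ===== LEMMAS AND PROOFS =====

lemma cum_eval : CUM = [55, 135, 195] := by rfl

-- the binary search on the concrete table, as nested ifs
lemma bis_eval (o : Int) (hlt : o < 195) :
    bisectRight [55, 135, 195] o 0 3 = if o < 135 then (if o < 55 then 0 else 1) else 2 := by
  rw [bisectRight]
  norm_num [PySem.List.pyGet?, PySem.List.pyIdx?]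
  split_ifs with h1 h2 <;> rw [bisectRight] <;>
    norm_num [PySem.List.pyGet?, PySem.List.pyIdx?] <;>
    split_ifs <;> (try rw [bisectRight]) <;> norm_num <;> simp_all

lemma mod_total (seed : Int) : PySem.Int.mod seed 195 = seed % 195 :=
  PySem.Int.mod_eq_emod_of_pos (by norm_num)

-- ===== VERDICT (by name: the statement is the Claim_ definition above) =====
theorem pick_neutral_hue_py_spec : Claim_equal_pick_neutral_hue_py := by
  intro seed _
  unfold Spec_pick_neutral_hue_py
  have hc : (PySem.List.pyGet? ([55, 135, 195] : List Int) (-1)).getD 0 = 195 := by decide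
  have ht : ((NEUTRAL_HUE_RANGES.map (fun p => p.2 - p.1)).foldl (· + ·) 0) = 195 := by decide
  have h0 : 0 ≤ PySem.Int.mod seed 195 := by
    rw [mod_total]; exact Int.emod_nonneg _ (by norm_num)
  have h1 : PySem.Int.mod seed 195 < 195 := by
    rw [mod_total]; exact Int.emod_lt_of_pos _ (by norm_num)
  simp only [pick_neutral_hue_py, pick_neutral_hue_py_alt, hc, ht, cum_eval]
  rw [show ([55, 135, 195] : List Int).length = 3 from rfl, bis_eval _ h1]
  simp only [NEUTRAL_HUE_RANGES, pickScan]
  split_ifs <;> norm_num [PySem.List.pyGet?, PySem.List.pyIdx?] <;> simp_all <;> omega
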